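-- pv_equiv track=rewrite | github.com/msuryaprakash/Apriori-Algortithm-Flask | apriori_xxxxxxx_1.py | powersets
-- ===== SOURCE A (Python) =====
-- def powersets(s, k):
--     """
--     Returns non-empty subsets of a set
--     """
--     x = len(s)
--     powerset = []
--     list = None
--     for i in range(1, 1 << x):
--         list = [s[j] for j in range(x) if (i & (1 << j))]
--         if len(list) == k:
--             powerset.append(list)
--
--     return powerset
-- ===== SOURCE B (Python) =====
-- def _combos(lst, k):
--     # all k-sized subsets of lst, in colexicographic order (by position of
--     # the largest chosen element), each subset in original order
--     if k == 0:
--         return [[]]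
--     if not lst:
--         return []
--     init, last = lst[:-1], lst[-1]
--     return _combos(init, k) + [c + [last] for c in _combos(init, k - 1)]
--
--
-- def powersets(s, k):
--     """
--     Returns non-empty subsets of a set
--     """
--     if k <= 0:
--         return []
--     return _combos(list(s), k)
-- ===== Notes on version B (the rewrite author's own statement) =====
-- stated objective: alternative
-- what changed: A enumerates all 2^n bitmasks and keeps the subsets of size k; B generates exactly the k-sized subsets by Pascal-style recursion on the last element (same colex order), never touching subsets of other sizes (intended as faster, O(C(n,k)*k) work vs O(2^n*n); a timing run measured 23x at the largest size both finished but could not confirm it at sizes where the output itself is exponentially large).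
import Mathlib
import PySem

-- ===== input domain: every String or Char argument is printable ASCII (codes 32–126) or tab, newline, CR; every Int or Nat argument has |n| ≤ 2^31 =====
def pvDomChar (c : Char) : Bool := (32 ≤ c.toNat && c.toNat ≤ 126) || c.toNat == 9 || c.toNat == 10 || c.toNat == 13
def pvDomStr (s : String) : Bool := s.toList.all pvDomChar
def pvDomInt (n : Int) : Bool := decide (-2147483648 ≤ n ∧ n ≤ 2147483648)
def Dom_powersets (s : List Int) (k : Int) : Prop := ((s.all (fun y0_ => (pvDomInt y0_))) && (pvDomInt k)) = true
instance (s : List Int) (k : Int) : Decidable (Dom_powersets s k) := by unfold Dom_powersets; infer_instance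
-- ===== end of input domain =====

-- B replaces A's scan of all 2^n bitmasks by Pascal-style recursion on the last
-- element, generating exactly the k-sized subsets in the same colex order.

-- ===== PORT A =====
-- literal port of A: for i in range(1, 1 << x): build [s[j] for j in range(x) if i & (1 << j)], append if its length == k
def powersets (s : List Int) (k : Int) : List (List Int) :=
  let x := s.length
  (PySem.List.pyRange 1 ((1:Int) <<< x) 1).foldl
    (fun powerset i =>
      let l := ((PySem.List.pyRange 0 (x:Int) 1).filter
                  (fun j => PySem.Int.band i ((1:Int) <<< j.toNat) != 0)).map
                (fun j => PySem.List.pyGetD s j 0)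
      if (l.length : Int) = k then powerset ++ [l] else powerset) []

-- ===== PORT B =====
-- port of Source B's _combos: k-sized subsets, recursing on lst[:-1] / lst[-1]
def pvCombos : List Int → Nat → List (List Int)
  | _, 0 => [[]]
  | [], _+1 => []
  | a :: rest, Nat.succ k =>
      let l := a :: rest
      pvCombos l.dropLast (k+1) ++
        (pvCombos l.dropLast k).map (fun c => c ++ [l.getLast (by simp)])
  termination_by l _ => l.length
  decreasing_by all_goals simp

def powersets_alt (s : List Int) (k : Int) : List (List Int) :=
  if k ≤ 0 then [] else pvCombos s k.toNat

-- ===== PRECONDITION & SPEC =====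
def Spec_powersets (s : List Int) (k : Int) (out : List (List Int)) : Prop := out = powersets_alt s k
instance (s : List Int) (k : Int) (out : List (List Int)) : Decidable (Spec_powersets s k out) := by unfold Spec_powersets; infer_instance

-- ===== CLAIM (what is proved, stated in full; the proofs are below) =====
def Claim_equal_powersets : Prop := ∀ (s : List Int) (k : Int), Dom_powersets s k → Spec_powersets s k (powersets s k)

-- ===== LEMMAS AND PROOFS =====

-- bit test of A's comprehension, and the subset a mask selects
def pvBit (i j : Int) : Bool := PySem.Int.band i ((1:Int) <<< (j.toNat : Int)) != 0

def pvSub (s : List Int) (i : Int) : List Int :=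
  ((PySem.List.pyRange 0 (s.length : Int) 1).filter (pvBit i)).map
    (fun j => PySem.List.pyGetD s j 0)

-- A's inner filtered set, for a Nat target size
def pvF (s : List Int) (k : Nat) : List (List Int) :=
  ((PySem.List.pyRange 1 ((1:Int) <<< s.length) 1).filter
      (fun i => (pvSub s i).length == k)).map (pvSub s)

theorem pvShift (x : Nat) : (1:Int) <<< x = ((2 ^ x : Nat) : Int) := by
  rw [Int.shiftLeft_eq]; push_cast; ring

theorem pvBit_of_nonneg (i : Int) (j : Nat) (hi : 0 ≤ i) :
    pvBit i j = i.toNat.testBit j := by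
  unfold pvBit
  rw [show ((j:Int).toNat = j) by simp, Int.shiftLeft_natCast_right, pvShift,
    PySem.Int.band_of_nonneg hi (by positivity), Int.toNat_natCast, Nat.and_two_pow]
  rcases i.toNat.testBit j with _ | _ <;> simp

theorem pvBit_high_low (x : Nat) (i : Int) (h0 : 0 ≤ i) (h1 : i < (1:Int) <<< x) :
    pvBit i x = false := by
  rw [pvBit_of_nonneg i x h0]
  exact Nat.testBit_lt_two_pow (by rw [pvShift] at h1; omega)

theorem pvBit_high_high (x : Nat) (m : Int) (h0 : 0 ≤ m) (h1 : m < (1:Int) <<< x) :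
    pvBit ((1:Int) <<< x + m) x = true := by
  have hp : 0 < 2 ^ x := Nat.two_pow_pos x
  rw [pvShift] at h1
  rw [pvBit_of_nonneg _ x (by rw [pvShift]; omega)]
  have : ((1:Int) <<< x + m).toNat = 2 ^ x + m.toNat := by rw [pvShift]; omega
  rw [this, Nat.testBit_two_pow_add_eq,
    Nat.testBit_lt_two_pow (by omega)]
  rfl

theorem pvBit_low (x : Nat) (j m : Int) (hj0 : 0 ≤ j) (hjx : j < (x:Int)) (h0 : 0 ≤ m) :
    pvBit ((1:Int) <<< x + m) j = pvBit m j := by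
  have hj : j = ((j.toNat : Nat) : Int) := by omega
  have hp : 0 < 2 ^ x := Nat.two_pow_pos x
  rw [hj, pvBit_of_nonneg _ _ (by rw [pvShift]; omega),
    pvBit_of_nonneg _ _ h0]
  have : ((1:Int) <<< x + m).toNat = 2 ^ x + m.toNat := by rw [pvShift]; omega
  rw [this, Nat.testBit_two_pow_add_gt (by omega)]

theorem pvBit_zero (j : Int) : pvBit 0 j = false := by
  unfold pvBit
  rw [PySem.Int.band_comm]
  simp

theorem pvSub_zero (s : List Int) : pvSub s 0 = [] := by
  unfold pvSub
  rw [List.filter_eq_nil_iff.mpr (fun j _ => by simp [pvBit_zero])]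
  rfl

theorem pvSub_ne_nil (s : List Int) (i : Int) (h1 : 1 ≤ i)
    (h2 : i < (1:Int) <<< s.length) : pvSub s i ≠ [] := by
  unfold pvSub
  rw [pvShift] at h2
  have hn : i.toNat ≠ 0 := by omega
  have hlt : i.toNat < 2 ^ s.length := by omega
  -- find a set bit below s.length
  have : ∃ j < s.length, i.toNat.testBit j = true := by
    by_contra hc
    push Not at hc
    have : i.toNat = 0 := by
      apply Nat.eq_of_testBit_eq
      intro j
      rcases lt_or_ge j s.length with h | h
      · simpa using (hc j h)
      · simp [Nat.testBit_lt_two_pow (lt_of_lt_of_le hlt (Nat.pow_le_pow_right (by omega) h))]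
    exact hn this
  obtain ⟨j, hjx, hjb⟩ := this
  have hmem : ((j:Int)) ∈ PySem.List.pyRange 0 (s.length : Int) 1 := by
    rw [PySem.List.mem_pyRange_one]; omega
  have hbit : pvBit i (j:Int) = true := by
    rw [pvBit_of_nonneg i _ (by omega)]
    simpa using hjb
  intro hnil
  rw [List.map_eq_nil_iff, List.filter_eq_nil_iff] at hnil
  exact (hnil _ hmem) hbit

-- A's loop is the filtered mask scan
theorem powersets_eq_filter (s : List Int) (k : Int) :
    powersets s k =
      ((PySem.List.pyRange 1 ((1:Int) <<< s.length) 1).filter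
          (fun i => ((pvSub s i).length : Int) == k)).map (pvSub s) := by
  have h0 : powersets s k = (PySem.List.pyRange 1 ((1:Int) <<< s.length) 1).foldl
      (fun powerset i => if ((pvSub s i).length : Int) = k
        then powerset ++ [pvSub s i] else powerset) [] := rfl
  rw [h0, PySem.List.foldl_append_ite
      (p := fun i => ((pvSub s i).length : Int) = k) (f := pvSub s)]
  simp only [List.nil_append]
  congr 1

-- the B-side recursion on a snoc list
theorem pvCombos_concat (s : List Int) (v : Int) (k : Nat) :
    pvCombos (s ++ [v]) (k + 1) =
      pvCombos s (k + 1) ++ (pvCombos s k).map (fun c => c ++ [v]) := by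
  cases s with
  | nil => simp [pvCombos]
  | cons a rest =>
      rw [show (a :: rest) ++ [v] = a :: (rest ++ [v]) from rfl, pvCombos]
      have h1 : (a :: (rest ++ [v])).dropLast = a :: rest := by
        rw [show a :: (rest ++ [v]) = (a :: rest) ++ [v] from rfl, List.dropLast_concat]
      have h2 : ∀ (h : a :: (rest ++ [v]) ≠ []), (a :: (rest ++ [v])).getLast h = v := by
        intro h
        show ((a :: rest) ++ [v]).getLast (by simp) = v
        exact List.getLast_concat
      simp only [h1, h2]


theorem pvGetD_append (s : List Int) (v : Int) (j : Int) (h0 : 0 ≤ j)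
    (h1 : j < (s.length : Int)) :
    PySem.List.pyGetD (s ++ [v]) j 0 = PySem.List.pyGetD s j 0 := by
  rw [PySem.List.pyGetD_eq_getElem (s ++ [v]) 0 h0 (by simp; omega),
      PySem.List.pyGetD_eq_getElem s 0 h0 (by exact_mod_cast h1)]
  exact List.getElem_append_left (by omega)

theorem pvSub_append_low (s : List Int) (v i : Int) (h0 : 0 ≤ i)
    (h1 : i < (1:Int) <<< s.length) :
    pvSub (s ++ [v]) i = pvSub s i := by
  unfold pvSub
  have hlen : (((s ++ [v]).length : Nat) : Int) = (s.length : Int) + 1 := by simp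
  rw [hlen, PySem.List.pyRange_one_succ_right (by exact_mod_cast Nat.zero_le _),
    List.filter_append, List.map_append]
  have hx : pvBit i (s.length : Int) = false := pvBit_high_low s.length i h0 h1
  rw [show List.filter (pvBit i) [(s.length : Int)] = [] by simp [hx],
    List.map_nil, List.append_nil]
  apply List.map_congr_left
  intro j hj
  have hj' := (List.mem_filter.mp hj).1
  rw [PySem.List.mem_pyRange_one] at hj'
  exact pvGetD_append s v j hj'.1 hj'.2

theorem pvSub_append_high (s : List Int) (v m : Int) (h0 : 0 ≤ m)
    (h1 : m < (1:Int) <<< s.length) :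
    pvSub (s ++ [v]) ((1:Int) <<< s.length + m) = pvSub s m ++ [v] := by
  unfold pvSub
  have hlen : (((s ++ [v]).length : Nat) : Int) = (s.length : Int) + 1 := by simp
  rw [hlen, PySem.List.pyRange_one_succ_right (by exact_mod_cast Nat.zero_le _),
    List.filter_append, List.map_append]
  have hx : pvBit ((1:Int) <<< s.length + m) (s.length : Int) = true :=
    pvBit_high_high s.length m h0 h1
  rw [show List.filter (pvBit ((1:Int) <<< s.length + m)) [(s.length : Int)] =
      [(s.length : Int)] by simp [hx]]
  congr 1
  · have hfil : List.filter (pvBit ((1:Int) <<< s.length + m))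
        (PySem.List.pyRange 0 (s.length : Int) 1) =
        List.filter (pvBit m) (PySem.List.pyRange 0 (s.length : Int) 1) :=
      List.filter_congr (fun j hj => by
        rw [PySem.List.mem_pyRange_one] at hj
        exact pvBit_low s.length j m hj.1 hj.2 h0)
    rw [hfil]
    apply List.map_congr_left
    intro j hj
    have hj' := (List.mem_filter.mp hj).1
    rw [PySem.List.mem_pyRange_one] at hj'
    exact pvGetD_append s v j hj'.1 hj'.2
  · rw [List.map_singleton, PySem.List.pyGetD_eq_getElem (s ++ [v]) 0
      (by exact_mod_cast Nat.zero_le _) (by simp)]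
    congr 1
    exact List.getElem_concat_length (by simp) _

theorem pvCombos_zero (s : List Int) : pvCombos s 0 = [[]] := by
  cases s <;> rw [pvCombos]

theorem pvBeq_succ (a b : Nat) : (a + 1 == b + 1) = (a == b) := by
  by_cases h : a = b <;> simp [h]

-- A's filtered scan on a snoc list
theorem pvF_concat (s : List Int) (v : Int) (k : Nat) :
    pvF (s ++ [v]) k =
      pvF s k ++
        ((PySem.List.pyRange 0 ((1:Int) <<< s.length) 1).filter
            (fun m => (pvSub s m).length + 1 == k)).map
          (fun m => pvSub s m ++ [v]) := by
  unfold pvF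
  have hp : 0 < 2 ^ s.length := Nat.two_pow_pos s.length
  have hp1 : 0 < 2 ^ (s.length + 1) := Nat.two_pow_pos (s.length + 1)
  have hlen : (s ++ [v]).length = s.length + 1 := by simp
  rw [hlen]
  rw [PySem.List.pyRange_one_append 1 ((1:Int) <<< s.length) ((1:Int) <<< (s.length + 1))
    (by rw [pvShift]; omega)
    (by rw [pvShift, pvShift]
        have h2 : 2 ^ (s.length + 1) = 2 * 2 ^ s.length := by ring
        omega)]
  rw [List.filter_append, List.map_append]
  congr 1
  · -- low masks: subsets of s
    have hfil : List.filter (fun i => (pvSub (s ++ [v]) i).length == k)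
        (PySem.List.pyRange 1 ((1:Int) <<< s.length) 1) =
        List.filter (fun i => (pvSub s i).length == k)
          (PySem.List.pyRange 1 ((1:Int) <<< s.length) 1) :=
      List.filter_congr (fun i hi => by
        rw [PySem.List.mem_pyRange_one] at hi
        rw [pvSub_append_low s v i (by omega) hi.2])
    rw [hfil]
    apply List.map_congr_left
    intro i hi
    have hi' := (List.mem_filter.mp hi).1
    rw [PySem.List.mem_pyRange_one] at hi'
    exact pvSub_append_low s v i (by omega) hi'.2
  · -- high masks: subsets of s with v appended
    have hsplit : PySem.List.pyRange ((1:Int) <<< s.length) ((1:Int) <<< (s.length + 1)) 1 =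
        (PySem.List.pyRange 0 ((1:Int) <<< s.length) 1).map
          (fun m => (1:Int) <<< s.length + m) := by
      rw [PySem.List.pyRange_one, PySem.List.pyRange_one, List.map_map]
      have hb : (((1:Int) <<< (s.length + 1)) - (1:Int) <<< s.length).toNat =
          (((1:Int) <<< s.length) - 0).toNat := by
        rw [pvShift, pvShift]
        have h2 : 2 ^ (s.length + 1) = 2 * 2 ^ s.length := by ring
        omega
      rw [hb]
      apply List.map_congr_left
      intro t _
      simp
    rw [hsplit, List.filter_map, List.map_map]
    have hfil : List.filter
          ((fun i => (pvSub (s ++ [v]) i).length == k) ∘ fun m => (1:Int) <<< s.length + m)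
          (PySem.List.pyRange 0 ((1:Int) <<< s.length) 1) =
        List.filter (fun m => (pvSub s m).length + 1 == k)
          (PySem.List.pyRange 0 ((1:Int) <<< s.length) 1) :=
      List.filter_congr (fun m hm => by
        rw [PySem.List.mem_pyRange_one] at hm
        simp only [Function.comp]
        rw [pvSub_append_high s v m hm.1 hm.2, List.length_append, List.length_singleton])
    rw [hfil]
    apply List.map_congr_left
    intro m hm
    have hm' := (List.mem_filter.mp hm).1
    rw [PySem.List.mem_pyRange_one] at hm'
    simp only [Function.comp]
    exact pvSub_append_high s v m hm'.1 hm'.2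

-- the two generators agree (with the empty subset prepended for k = 0)
theorem pvF_combos (s : List Int) :
    ∀ k, (if k = 0 then [[]] else []) ++ pvF s k = pvCombos s k := by
  induction s using List.reverseRecOn with
  | nil =>
      intro k
      have hnil : pvF [] k = [] := by
        unfold pvF
        rw [show ((1:Int) <<< ([] : List Int).length) = 1 from rfl,
          PySem.List.pyRange_one_eq_nil (by omega)]
        rfl
      rw [hnil, List.append_nil]
      cases k with
      | zero => rw [pvCombos_zero]; rfl
      | succ k => rw [pvCombos, if_neg (by omega)]
  | append_singleton s v ih =>
      intro k
      have hp : 0 < 2 ^ s.length := Nat.two_pow_pos s.length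
      rw [pvF_concat]
      cases k with
      | zero =>
          rw [if_pos rfl, pvCombos_zero]
          have h1 : pvF s 0 = [] := by
            have := ih 0
            rw [if_pos rfl, pvCombos_zero] at this
            simpa using this
          have h2 : (PySem.List.pyRange 0 ((1:Int) <<< s.length) 1).filter
              (fun m => (pvSub s m).length + 1 == 0) = [] := by
            apply List.filter_eq_nil_iff.mpr
            intro m _
            simp
          rw [h1, h2, List.map_nil, List.append_nil]
          rfl
      | succ k' =>
          have hA : pvF s (k' + 1) = pvCombos s (k' + 1) := by
            have := ih (k' + 1)
            rw [if_neg (by omega), List.nil_append] at this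
            exact this
          rw [if_neg (by omega), List.nil_append, pvCombos_concat, hA]
          congr 1
          have hcons : PySem.List.pyRange 0 ((1:Int) <<< s.length) 1 =
              0 :: PySem.List.pyRange 1 ((1:Int) <<< s.length) 1 := by
            have h := PySem.List.pyRange_one_cons (a := 0) (b := (1:Int) <<< s.length)
              (by rw [pvShift]; omega)
            simpa using h
          rw [hcons, List.filter_cons]
          have hhead : ((pvSub s 0).length + 1 == k' + 1) = (0 == k') := by
            rw [pvSub_zero, List.length_nil, pvBeq_succ]
          rw [hhead]
          have hmap : ((PySem.List.pyRange 1 ((1:Int) <<< s.length) 1).filter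
                (fun m => (pvSub s m).length + 1 == k' + 1)).map
                (fun m => pvSub s m ++ [v]) =
              (pvF s k').map (fun c => c ++ [v]) := by
            rw [List.filter_congr (fun m _ => pvBeq_succ (pvSub s m).length k')]
            unfold pvF
            rw [List.map_map]
            rfl
          by_cases hk : k' = 0
          · subst hk
            rw [if_pos (show ((0:Nat) == 0) = true from rfl), List.map_cons, hmap, pvSub_zero]
            have h0 := ih 0
            rw [if_pos rfl] at h0
            rw [← h0, List.map_append]
            rfl
          · have hfalse : (0 == k') = false := by
              rw [beq_eq_false_iff_ne]
              omega
            rw [hfalse]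
            simp only [Bool.false_eq_true, if_false]
            rw [hmap]
            have hK := ih k'
            rw [if_neg hk, List.nil_append] at hK
            rw [hK]

-- ===== VERDICT (by name: the statement is the Claim_ definition above) =====
theorem powersets_spec : Claim_equal_powersets := by
  intro s k _
  unfold Spec_powersets powersets_alt
  rw [powersets_eq_filter]
  by_cases hk : k ≤ 0
  · rw [if_pos hk]
    rw [List.filter_eq_nil_iff.mpr (fun i hi => by
      rw [PySem.List.mem_pyRange_one] at hi
      have hne := pvSub_ne_nil s i hi.1 hi.2
      have hlen : 0 < (pvSub s i).length := List.length_pos_iff.mpr hne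
      simp only [beq_iff_eq]
      intro hcontra
      omega)]
    rfl
  · rw [if_neg hk]
    have hk1 : 1 ≤ k := by omega
    have hkc : k = ((k.toNat : Nat) : Int) := by omega
    have hcond : ∀ i ∈ PySem.List.pyRange 1 ((1:Int) <<< s.length) 1,
        (((pvSub s i).length : Int) == k) = ((pvSub s i).length == k.toNat) := by
      intro i _
      by_cases h : (pvSub s i).length = k.toNat
      · have h2 : ((pvSub s i).length : Int) = k := by omega
        simp [h2]
        omega
      · have h2 : ¬ ((pvSub s i).length : Int) = k := by omega
        simp [h]
        omega
    rw [List.filter_congr hcond]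
    have h := pvF_combos s k.toNat
    rw [if_neg (by omega), List.nil_append] at h
    unfold pvF at h
    exact h
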